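-- pv_equiv track=rewrite | github.com/moralrecordings/SpoonFight | SpoonFight.py | get_loop_points
-- ===== SOURCE A (Python) =====
-- def get_loop_points(audio_file):
--     """returns an array of tuples
--         these are the 8 slice pairs
--     """
--     #TODO make this a seperate class that can use different slice techniques
--     slice_length = int(len(audio_file)/8  )
--     points = []
--     for i in range(8):
--         x_x= i*slice_length, (i+1)*slice_length
--         points.append(x_x)
--     #set the end of the last one to be the length of the audio sample to remove any rounding errors
--     points[7] = points[6][1], len(audio_file)
--     return points
-- ===== SOURCE B (Python) =====
-- def get_loop_points(audio_file):
--     n = len(audio_file)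
--     slice_length = int(n / 8)
--     points = []
--     end = n
--     for i in range(7, -1, -1):
--         start = i * slice_length
--         points = [(start, end)] + points
--         end = start
--     return points
-- ===== Notes on version B (the rewrite author's own statement) =====
-- stated objective: alternative
-- what changed: Single backward pass that builds the pairs back-to-front carrying the current end offset in an accumulator (each pair's end is the next pair's start), so the final length is just the initial accumulator and no post-hoc patching of the last pair is needed.
import Mathlib
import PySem

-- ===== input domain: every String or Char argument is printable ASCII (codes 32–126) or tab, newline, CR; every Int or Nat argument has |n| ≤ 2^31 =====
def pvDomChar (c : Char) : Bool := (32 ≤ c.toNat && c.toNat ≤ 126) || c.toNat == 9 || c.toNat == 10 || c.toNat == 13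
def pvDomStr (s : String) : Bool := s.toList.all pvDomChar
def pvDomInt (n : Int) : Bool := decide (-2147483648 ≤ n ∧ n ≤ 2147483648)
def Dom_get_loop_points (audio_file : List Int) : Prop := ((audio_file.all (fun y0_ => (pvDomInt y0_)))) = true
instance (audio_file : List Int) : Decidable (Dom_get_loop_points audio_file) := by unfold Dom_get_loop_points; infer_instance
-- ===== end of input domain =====

-- B builds the pairs back-to-front in one backward pass, carrying the current end offset
-- (each pair's end is the next pair's start), so no post-hoc patch of the last pair is needed.


-- ===== PORT A =====
def get_loop_points (audio_file : List Int) : List (Int × Int) :=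
  -- int(len(audio_file)/8): len ≥ 0, so truncating float division equals floor division by 8
  let slice_length : Int := PySem.Int.floordiv (audio_file.length : Int) 8
  let points : List (Int × Int) :=
    (PySem.List.pyRange 0 8 1).foldl
      (fun acc i => acc ++ [(i * slice_length, (i + 1) * slice_length)]) []
  -- points[7] = points[6][1], len(audio_file)  (always in range: points has 8 elements)
  match PySem.List.pyGet? points 6 with
  | some p => points.set 7 (p.2, (audio_file.length : Int))
  | none => []

-- ===== PORT B =====
def get_loop_points_alt (audio_file : List Int) : List (Int × Int) :=
  let n : Int := (audio_file.length : Int)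
  let slice_length : Int := PySem.Int.floordiv n 8
  -- backward loop over range(7, -1, -1) carrying (points, end)
  let st : List (Int × Int) × Int :=
    (PySem.List.pyRange 7 (-1) (-1)).foldl
      (fun (st : List (Int × Int) × Int) i =>
        let start := i * slice_length
        ((start, st.2) :: st.1, start))
      ([], n)
  st.1

-- ===== PRECONDITION & SPEC =====
def Spec_get_loop_points (audio_file : List Int) (out : List (Int × Int)) : Prop := out = get_loop_points_alt audio_file
instance (audio_file : List Int) (out : List (Int × Int)) : Decidable (Spec_get_loop_points audio_file out) := by unfold Spec_get_loop_points; infer_instance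

-- ===== CLAIM (what is proved, stated in full; the proofs are below) =====
def Claim_equal_get_loop_points : Prop := ∀ (audio_file : List Int), Dom_get_loop_points audio_file → Spec_get_loop_points audio_file (get_loop_points audio_file)

-- ===== LEMMAS AND PROOFS =====

-- ===== VERDICT (by name: the statement is the Claim_ definition above) =====
theorem get_loop_points_spec : Claim_equal_get_loop_points := by
  intro audio_file _
  unfold Spec_get_loop_points get_loop_points get_loop_points_alt
  simp [PySem.List.pyRange, PySem.List.pyGet?, PySem.List.pyIdx?, List.range_succ]
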